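-- pv_equiv track=rewrite | github.com/mgopi1990/George3Hacker | min_num_from_digits.py | min_number
-- ===== SOURCE A (Python) =====
-- def min_number(digits):
-- 	digits_count = {
-- 		'0':0, '1':0, '2':0, '3':0, '4':0,
-- 		'5':0, '6':0, '7':0, '8':0, '9':0
-- 	}
--
-- 	for i in digits:
-- 		#digits_count.setdefault(i, 0)
-- 		digits_count[i] += 1
--
-- 	# we dont want 0 at MSB
-- 	for i in "123456789":
-- 		if digits_count[i]:
-- 			result = i
-- 			digits_count[i] -= 1
-- 			break
--
-- 	for i in "0123456789":
-- 		result += i * digits_count[i]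
--
-- 	return result
-- ===== SOURCE B (Python) =====
-- def min_number(digits):
--     values = sorted(map(int, digits))
--     zeros = values.count(0)
--     return str(values[zeros]) + "0" * zeros + "".join(map(str, values[zeros + 1:]))
-- ===== Notes on version B (the rewrite author's own statement) =====
-- stated objective: alternative
-- what changed: A counts digit strings into a fixed 0-9 frequency table and rebuilds the answer from the counts; B parses the digits with int(), sorts the values, counts the zeros, and returns the first nonzero value followed by the zeros and the remaining sorted values.
import Mathlib
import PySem

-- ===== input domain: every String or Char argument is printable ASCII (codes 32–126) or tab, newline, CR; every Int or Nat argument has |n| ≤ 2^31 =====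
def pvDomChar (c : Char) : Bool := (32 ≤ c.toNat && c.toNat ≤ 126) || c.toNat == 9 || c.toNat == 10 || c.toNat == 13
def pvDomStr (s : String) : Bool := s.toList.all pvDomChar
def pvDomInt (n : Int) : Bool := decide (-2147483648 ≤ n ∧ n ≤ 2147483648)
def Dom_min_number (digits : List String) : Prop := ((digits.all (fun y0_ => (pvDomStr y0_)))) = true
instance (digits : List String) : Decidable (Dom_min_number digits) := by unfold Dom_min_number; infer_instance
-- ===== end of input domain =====

-- B replaces A's fixed 0-9 frequency-table pass with a comparison sort plus a count of zeros (objective: simpler).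


-- shared primitive: Python `s * n` for a string and an int (negative n gives "") — exact
def pyStrMul (s : String) (n : Int) : String := PySem.Str.join "" (List.replicate n.toNat s)

-- ===== PORT A =====
def min_number (digits : List String) : String :=
  let d0 : PySem.Dict String Int := PySem.Dict.ofList
    [("0",0),("1",0),("2",0),("3",0),("4",0),("5",0),("6",0),("7",0),("8",0),("9",0)]
  -- Python raises KeyError here on a key outside '0'-'9' (modify with a default creates it instead);
  -- those inputs are outside Pre_min_number
  let dc := digits.foldl (fun d i => d.modify i 0 (· + 1)) d0
  match ["1","2","3","4","5","6","7","8","9"].find? (fun i => dc.getD i 0 != 0) with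
  | none => ""  -- Python: `result` stays unbound → UnboundLocalError; outside Pre_min_number
  | some m =>
    let dc2 := dc.modify m 0 (· - 1)
    ["0","1","2","3","4","5","6","7","8","9"].foldl (fun r i => r ++ pyStrMul i (dc2.getD i 0)) m

-- ===== PORT B =====
def min_number_alt (digits : List String) : String :=
  match digits.mapM PySem.Int.ofStr? with
  | none => ""  -- Python: int(...) raises ValueError; outside Pre_min_number
  | some vs =>
    let values := PySem.List.sorted vs (fun x => x)
    let zeros := PySem.List.count values 0
    match PySem.List.pyGet? values (zeros : Int) with
    | none => ""  -- Python: IndexError (no nonzero value); outside Pre_min_number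
    | some lead =>
      PySem.Int.toStr lead ++ pyStrMul "0" (zeros : Int)
        ++ PySem.Str.join ""
            ((PySem.List.slice values (some ((zeros : Int) + 1)) none).map PySem.Int.toStr)

-- ===== PRECONDITION & SPEC =====
-- Pre_ excludes exactly the inputs where the Python A raises: an element that is not one of the ten
-- one-character digit strings (KeyError), and inputs with no nonzero digit (UnboundLocalError).
def Pre_min_number (digits : List String) : Prop :=
  (∀ s ∈ digits, s ∈ ["0","1","2","3","4","5","6","7","8","9"]) ∧ (∃ s ∈ digits, s ≠ "0")
instance (digits : List String) : Decidable (Pre_min_number digits) := by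
  unfold Pre_min_number; infer_instance
def pvWitness_min_number : List String := ["1", "0", "3", "0", "1"]

def Spec_min_number (digits : List String) (out : String) : Prop := out = min_number_alt digits
instance (digits : List String) (out : String) : Decidable (Spec_min_number digits out) := by
  unfold Spec_min_number; infer_instance

-- ===== CLAIM (what is proved, stated in full; the proofs are below) =====
def Claim_equal_min_number : Prop := ∀ (digits : List String), Dom_min_number digits → Pre_min_number digits → Spec_min_number digits (min_number digits)

-- ===== LEMMAS AND PROOFS =====

-- `"".join` with the empty separator, list by list
lemma join0_cons (x : String) (xs : List String) :
    PySem.Str.join "" (x :: xs) = x ++ PySem.Str.join "" xs := by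
  apply String.toList_injective
  cases xs with
  | nil => simp [PySem.Str.toList_join, PySem.Chars.join, List.intercalate]
  | cons y ys =>
    simp [PySem.Str.toList_join, String.toList_append, PySem.Chars.join_cons_cons]

lemma join0_nil : PySem.Str.join "" ([] : List String) = "" := by
  apply String.toList_injective
  simp [PySem.Str.toList_join, PySem.Chars.join_nil]

lemma join0_append (xs ys : List String) :
    PySem.Str.join "" (xs ++ ys) = PySem.Str.join "" xs ++ PySem.Str.join "" ys := by
  induction xs with
  | nil => simp [join0_nil]
  | cons x xs ih => simp [join0_cons, ih, String.append_assoc]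

-- A's initial dict maps everything to 0
lemma pvD0_getD (v : String) :
    (PySem.Dict.ofList [("0",(0:Int)),("1",0),("2",0),("3",0),("4",0),
      ("5",0),("6",0),("7",0),("8",0),("9",0)]).getD v 0 = 0 := by
  have h : PySem.Dict.ofList [("0",(0:Int)),("1",0),("2",0),("3",0),("4",0),
      ("5",0),("6",0),("7",0),("8",0),("9",0)]
      = PySem.Dict.mk [("0",(0:Int)),("1",0),("2",0),("3",0),("4",0),
      ("5",0),("6",0),("7",0),("8",0),("9",0)] := by decide
  rw [h]
  simp [PySem.Dict.getD, PySem.Dict.get?_mk_cons]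
  split_ifs <;> rfl

def pvDS : List String := ["0","1","2","3","4","5","6","7","8","9"]

-- digit (value, string) pairs, ascending
def pvP : List (Int × String) :=
  [(0,"0"),(1,"1"),(2,"2"),(3,"3"),(4,"4"),(5,"5"),(6,"6"),(7,"7"),(8,"8"),(9,"9")]

def pvNZP : List (Int × String) :=
  [(1,"1"),(2,"2"),(3,"3"),(4,"4"),(5,"5"),(6,"6"),(7,"7"),(8,"8"),(9,"9")]

-- the value a digit string parses to
def pvVal (s : String) : Int := (PySem.Int.ofStr? s).getD 0

lemma mapM_val (digits : List String) (hall : ∀ s ∈ digits, s ∈ pvDS) :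
    digits.mapM PySem.Int.ofStr? = some (digits.map pvVal) := by
  induction digits with
  | nil => rfl
  | cons d rest ih =>
    have hd : PySem.Int.ofStr? d = some (pvVal d) := by
      have hmem := hall d (List.mem_cons_self ..)
      fin_cases hmem <;> decide
    have ih' := ih (fun s hs => hall s (List.mem_cons_of_mem _ hs))
    simp [List.mapM_cons, hd, ih']

-- the multiset of parsed values rebuilt as ascending blocks of equal values
def pvCanon (digits : List String) : List Int :=
  pvP.flatMap (fun p => List.replicate (digits.count p.2) p.1)

lemma count_map_val (digits : List String) (hall : ∀ s ∈ digits, s ∈ pvDS)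
    (p : Int × String) (hp : p ∈ pvP) :
    List.count p.1 (digits.map pvVal) = List.count p.2 digits := by
  induction digits with
  | nil => simp
  | cons d rest ih =>
    have hd := hall d (List.mem_cons_self ..)
    have ih' := ih (fun s hs => hall s (List.mem_cons_of_mem _ hs))
    simp only [List.map_cons, List.count_cons, ih']
    congr 1
    have hbeq : (pvVal d == p.1) = (d == p.2) := by
      fin_cases hd <;> fin_cases hp <;> decide
    rw [hbeq]

lemma canon_perm (digits : List String) (hall : ∀ s ∈ digits, s ∈ pvDS) :
    (pvCanon digits).Perm (digits.map pvVal) := by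
  rw [List.perm_iff_count]
  intro x
  by_cases hx : x ∈ ([0,1,2,3,4,5,6,7,8,9] : List Int)
  · fin_cases hx <;>
      simp [pvCanon, pvP, List.count_replicate,
        count_map_val digits hall (0,"0") (by decide),
        count_map_val digits hall (1,"1") (by decide),
        count_map_val digits hall (2,"2") (by decide),
        count_map_val digits hall (3,"3") (by decide),
        count_map_val digits hall (4,"4") (by decide),
        count_map_val digits hall (5,"5") (by decide),
        count_map_val digits hall (6,"6") (by decide),
        count_map_val digits hall (7,"7") (by decide),
        count_map_val digits hall (8,"8") (by decide),
        count_map_val digits hall (9,"9") (by decide)]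
  · have h1 : x ∉ pvCanon digits := by
      intro hmem
      rcases List.mem_flatMap.mp hmem with ⟨q, hq, hrep⟩
      rw [List.eq_of_mem_replicate hrep] at hx
      fin_cases hq <;> simp_all
    have h2 : x ∉ digits.map pvVal := by
      intro hmem
      rcases List.mem_map.mp hmem with ⟨d, hdm, hval⟩
      have hd := hall d hdm
      have hv : pvVal d ∈ ([0,1,2,3,4,5,6,7,8,9] : List Int) := by
        fin_cases hd <;> decide
      rw [hval] at hv
      exact hx hv
    rw [List.count_eq_zero.mpr h1, List.count_eq_zero.mpr h2]

lemma pairwise_flatMap_replicate {β : Type} (ds : List β) (v : β → Int) (c : β → Nat)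
    (hds : ds.Pairwise (fun a b => v a < v b)) :
    (ds.flatMap (fun d => List.replicate (c d) (v d))).Pairwise (· ≤ ·) := by
  induction ds with
  | nil => simp
  | cons d ds ih =>
    rw [List.flatMap_cons, List.pairwise_append]
    refine ⟨?_, ih hds.tail, ?_⟩
    · rw [List.pairwise_replicate]; right; exact le_refl (v d)
    · intro a ha b hb
      rcases List.mem_flatMap.mp hb with ⟨e, he, hrep⟩
      rw [List.eq_of_mem_replicate ha, List.eq_of_mem_replicate hrep]
      exact le_of_lt (List.rel_of_pairwise_cons hds he)

lemma canon_pairwise (digits : List String) : (pvCanon digits).Pairwise (· ≤ ·) :=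
  pairwise_flatMap_replicate pvP Prod.fst _ (by decide)

-- head structure of a flatMap of replicates: the first nonempty block starts it
lemma flatMap_replicate_find (ds : List (Int × String)) (c : Int × String → Nat)
    (mp : Int × String) (hnd : (ds.map Prod.snd).Nodup)
    (hm : ds.find? (fun p => c p != 0) = some mp) :
    ds.flatMap (fun p => List.replicate (c p) p.1)
      = mp.1 :: ds.flatMap (fun p => List.replicate (c p - (if p.2 = mp.2 then 1 else 0)) p.1) := by
  induction ds with
  | nil => simp at hm
  | cons d ds ih =>
    simp only [List.map_cons] at hnd
    have hnotin : d.2 ∉ ds.map Prod.snd := (List.nodup_cons.mp hnd).1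
    have hnd' : (ds.map Prod.snd).Nodup := (List.nodup_cons.mp hnd).2
    by_cases hd : c d = 0
    · rw [List.find?_cons_of_neg (by simp [hd])] at hm
      have hmem := List.mem_of_find?_eq_some hm
      have hdm : ¬ (d.2 = mp.2) := fun h =>
        hnotin (h ▸ List.mem_map_of_mem hmem)
      rw [List.flatMap_cons, List.flatMap_cons, hd, if_neg hdm]
      simp only [List.replicate_zero, List.nil_append, Nat.sub_zero]
      exact ih hnd' hm
    · rw [List.find?_cons_of_pos (by simp [hd])] at hm
      have hdm : d = mp := by injection hm
      subst hdm
      rw [List.flatMap_cons, List.flatMap_cons, if_pos rfl]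
      obtain ⟨k, hk⟩ : ∃ k, c d = k + 1 := ⟨c d - 1, by omega⟩
      rw [hk, List.replicate_succ]
      simp only [List.cons_append, Nat.add_sub_cancel, List.cons.injEq, true_and]
      congr 1
      rw [List.flatMap_def, List.flatMap_def]
      apply congrArg
      apply List.map_congr_left
      intro e he
      have hne : ¬ (e.2 = d.2) := fun h =>
        hnotin (h ▸ List.mem_map_of_mem he)
      rw [if_neg hne, Nat.sub_zero]

-- Python `i * n` with the counts A keeps, as a join of a replicate over Nat counts
lemma pyStrMul_eq_join (i m : String) (ni nm : Nat) (h : i = m → ni = nm ∧ nm ≠ 0) :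
    pyStrMul i (if i = m then (nm : Int) - 1 else (ni : Int))
      = PySem.Str.join "" (List.replicate (ni - if i = m then 1 else 0) i) := by
  split_ifs with h'
  · obtain ⟨he, hnz⟩ := h h'
    subst he
    simp only [pyStrMul]
    have h2 : ((ni : Int) - 1).toNat = ni - 1 := by omega
    rw [h2]
  · simp [pyStrMul]

-- ===== VERDICT (by name: the statement is the Claim_ definition above) =====
theorem min_number_spec : Claim_equal_min_number := by
  intro digits _ hpre
  obtain ⟨hall, s, hs, hsne⟩ := hpre
  unfold Spec_min_number
  -- A's dict after the counting loop is the multiset count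
  have hdc : ∀ v, (digits.foldl (fun d i => d.modify i 0 (· + 1))
      (PySem.Dict.ofList [("0",(0:Int)),("1",0),("2",0),("3",0),("4",0),
        ("5",0),("6",0),("7",0),("8",0),("9",0)])).getD v 0 = (digits.count v : Int) := by
    intro v
    rw [PySem.Dict.getD_foldl_modify_add_one, pvD0_getD, zero_add]
  have hpred : (fun i => (digits.foldl (fun d i => d.modify i 0 (· + 1))
      (PySem.Dict.ofList [("0",(0:Int)),("1",0),("2",0),("3",0),("4",0),
        ("5",0),("6",0),("7",0),("8",0),("9",0)])).getD i 0 != 0)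
      = (fun i => digits.count i != 0) := by
    funext i; rw [hdc]; by_cases h : List.count i digits = 0 <;> simp [h, bne]
  -- the first nonzero digit exists
  have hsNZ : s ∈ (["1","2","3","4","5","6","7","8","9"] : List String) := by
    have hmem := hall s hs
    fin_cases hmem <;> first | (exact absurd rfl hsne) | decide
  have hscount : digits.count s ≠ 0 := by
    have := List.count_pos_iff.mpr hs
    omega
  obtain ⟨m, hm⟩ : ∃ m, List.find? (fun i => digits.count i != 0)
      ["1","2","3","4","5","6","7","8","9"] = some m :=
    Option.isSome_iff_exists.mp (List.find?_isSome.mpr ⟨s, hsNZ, by simp [hscount]⟩)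
  have hmNZ : m ∈ (["1","2","3","4","5","6","7","8","9"] : List String) :=
    List.mem_of_find?_eq_some hm
  have hm0 : ¬ ("0" = m) := by fin_cases hmNZ <;> decide
  have hmcount : digits.count m ≠ 0 := by
    have := List.find?_some hm
    simpa using this
  -- B parses every element, and its sorted value list is the canonical ascending block list
  have hmapM : digits.mapM PySem.Int.ofStr? = some (digits.map pvVal) := mapM_val digits hall
  have hsorted : PySem.List.sorted (digits.map pvVal) (fun x => x) = pvCanon digits :=
    PySem.List.sorted_id_eq_of_perm_of_pairwise _ _ (canon_perm digits hall) (canon_pairwise digits)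
  have hsplit : pvCanon digits
      = List.replicate (digits.count "0") (0:Int)
        ++ List.flatMap (fun p => List.replicate (digits.count p.2) p.1) pvNZP := rfl
  obtain ⟨mp, hfp, hm2⟩ : ∃ mp : Int × String,
      List.find? (fun p => digits.count p.2 != 0) pvNZP = some mp ∧ mp.2 = m := by
    have h9 : (["1","2","3","4","5","6","7","8","9"] : List String) = pvNZP.map Prod.snd := by
      decide
    rw [h9, List.find?_map] at hm
    cases hfp : List.find? ((fun i => digits.count i != 0) ∘ Prod.snd) pvNZP with
    | none => rw [hfp] at hm; simp at hm
    | some q =>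
      rw [hfp] at hm
      exact ⟨q, by simpa [Function.comp] using hfp, by simpa using hm⟩
  have hmpmem : mp ∈ pvNZP := List.mem_of_find?_eq_some hfp
  have htos : PySem.Int.toStr mp.1 = mp.2 := by fin_cases hmpmem <;> decide
  have hmp1 : mp.1 ≠ 0 := by fin_cases hmpmem <;> decide
  have hrest := flatMap_replicate_find pvNZP (fun p => digits.count p.2) mp (by decide) hfp
  have hord : PySem.List.sorted (digits.map pvVal) (fun x => x)
      = List.replicate (digits.count "0") (0:Int) ++ mp.1 ::
        List.flatMap (fun p => List.replicate (digits.count p.2 - if p.2 = mp.2 then 1 else 0) p.1)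
          pvNZP := by
    rw [hsorted, hsplit, hrest]
  set T := List.flatMap
      (fun p => List.replicate (digits.count p.2 - if p.2 = mp.2 then 1 else 0) p.1) pvNZP
    with hT
  have hzeros : PySem.List.count
      (List.replicate (digits.count "0") (0:Int) ++ mp.1 :: T) (0:Int) = digits.count "0" := by
    rw [PySem.List.count_eq, List.count_append]
    have h1 : List.count (0:Int) (List.replicate (digits.count "0") (0:Int))
        = digits.count "0" := by simp
    have h2 : List.count (0:Int) (mp.1 :: T) = 0 := by
      rw [List.count_eq_zero]
      intro hmem
      rcases List.mem_cons.mp hmem with h | h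
      · exact hmp1 h.symm
      · rcases List.mem_flatMap.mp h with ⟨q, hq, hrep⟩
        have he0 : (0:Int) = q.1 := List.eq_of_mem_replicate hrep
        fin_cases hq <;> simp_all
    rw [h1, h2]
    omega
  have hget : PySem.List.pyGet?
      (List.replicate (digits.count "0") (0:Int) ++ mp.1 :: T) ((digits.count "0" : Int))
      = some mp.1 := by
    rw [show ((digits.count "0" : Int))
        = ((List.replicate (digits.count "0") (0:Int)).length : Int) by simp]
    exact PySem.List.pyGet?_append_length _ _ _
  have hslice : PySem.List.slice
      (List.replicate (digits.count "0") (0:Int) ++ mp.1 :: T)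
      (some ((digits.count "0" : Int) + 1)) none = T := by
    have h1 : ((digits.count "0" : Int) + 1) = ((digits.count "0" + 1 : Nat) : Int) := by
      push_cast; ring
    rw [h1, PySem.List.slice_from_natCast]
    rw [show List.replicate (digits.count "0") (0:Int) ++ mp.1 :: T
        = (List.replicate (digits.count "0") (0:Int) ++ [mp.1]) ++ T by simp]
    rw [show digits.count "0" + 1
        = (List.replicate (digits.count "0") (0:Int) ++ [mp.1]).length by simp]
    exact List.drop_left
  -- A's dict after the decrement
  have hdc2 : ∀ i, ((digits.foldl (fun d i => d.modify i 0 (· + 1))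
      (PySem.Dict.ofList [("0",(0:Int)),("1",0),("2",0),("3",0),("4",0),
        ("5",0),("6",0),("7",0),("8",0),("9",0)])).modify m 0 (· - 1)).getD i 0
      = if i = m then (digits.count m : Int) - 1 else (digits.count i : Int) := by
    intro i
    rw [PySem.Dict.getD_modify]
    split_ifs <;> rw [hdc]
  -- evaluate both ports
  simp only [min_number, min_number_alt]
  rw [hpred, hm, hmapM]
  simp only []
  rw [hord, hzeros, hget, hslice]
  simp only [List.foldl_cons, List.foldl_nil]
  rw [hdc2, hdc2, hdc2, hdc2, hdc2, hdc2, hdc2, hdc2, hdc2, hdc2]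
  rw [if_neg hm0]
  rw [pyStrMul_eq_join "1" m _ _ (fun h => ⟨by rw [h], hmcount⟩),
      pyStrMul_eq_join "2" m _ _ (fun h => ⟨by rw [h], hmcount⟩),
      pyStrMul_eq_join "3" m _ _ (fun h => ⟨by rw [h], hmcount⟩),
      pyStrMul_eq_join "4" m _ _ (fun h => ⟨by rw [h], hmcount⟩),
      pyStrMul_eq_join "5" m _ _ (fun h => ⟨by rw [h], hmcount⟩),
      pyStrMul_eq_join "6" m _ _ (fun h => ⟨by rw [h], hmcount⟩),
      pyStrMul_eq_join "7" m _ _ (fun h => ⟨by rw [h], hmcount⟩),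
      pyStrMul_eq_join "8" m _ _ (fun h => ⟨by rw [h], hmcount⟩),
      pyStrMul_eq_join "9" m _ _ (fun h => ⟨by rw [h], hmcount⟩)]
  rw [htos, hm2, hT]
  simp only [pvNZP, List.flatMap_cons, List.flatMap_nil, List.append_nil,
    List.map_append, List.map_replicate]
  rw [show PySem.Int.toStr 1 = "1" by decide, show PySem.Int.toStr 2 = "2" by decide,
      show PySem.Int.toStr 3 = "3" by decide, show PySem.Int.toStr 4 = "4" by decide,
      show PySem.Int.toStr 5 = "5" by decide, show PySem.Int.toStr 6 = "6" by decide,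
      show PySem.Int.toStr 7 = "7" by decide, show PySem.Int.toStr 8 = "8" by decide,
      show PySem.Int.toStr 9 = "9" by decide]
  simp only [join0_append, String.append_assoc]
  rw [hm2]
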